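-- pv_equiv track=rewrite | github.com/Patrik1352/Yandex_algo | 1/A.py | soccer_sucks
-- ===== SOURCE A (Python) =====
-- def soccer_sucks(x1, y1, x2, y2, home):
--     new_x2 = x2
--     while x1+new_x2 < y1 + y2:
--         new_x2 += 1
--     # счет сравняли
--
--     if home == 2:
--         if y1<=y2:
--             return new_x2+1
--         else:
--             return new_x2
--     else:
--         return new_x2 + 1
-- ===== SOURCE B (Python) =====
-- def soccer_sucks(x1, y1, x2, y2, home):
--     tied = max(x2, y1 + y2 - x1)
--     if home == 2 and y1 > y2:
--         return tied
--     return tied + 1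
-- ===== Notes on version B (the rewrite author's own statement) =====
-- stated objective: faster
-- what changed: Replaces the unit-increment while loop with the closed form max(x2, y1+y2-x1) and a single branch for the final bump.
import Mathlib
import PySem

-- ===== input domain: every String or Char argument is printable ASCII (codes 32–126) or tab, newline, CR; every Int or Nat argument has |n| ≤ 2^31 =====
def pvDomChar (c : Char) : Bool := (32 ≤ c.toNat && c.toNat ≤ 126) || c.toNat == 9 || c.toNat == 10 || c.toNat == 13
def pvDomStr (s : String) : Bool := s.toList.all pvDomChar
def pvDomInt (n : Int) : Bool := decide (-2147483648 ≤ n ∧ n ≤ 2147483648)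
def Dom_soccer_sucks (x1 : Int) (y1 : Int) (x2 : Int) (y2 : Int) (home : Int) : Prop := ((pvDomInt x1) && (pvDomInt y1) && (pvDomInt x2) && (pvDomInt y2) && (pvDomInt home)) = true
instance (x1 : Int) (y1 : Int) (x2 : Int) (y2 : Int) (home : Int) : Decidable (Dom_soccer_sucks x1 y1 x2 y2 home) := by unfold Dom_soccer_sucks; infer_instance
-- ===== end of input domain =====

-- B: closed-form max(x2, y1+y2-x1) replaces the unit-increment loop (asymptotically faster).


-- ===== PORT A =====
-- while x1+new_x2 < y1+y2: new_x2 += 1   (terminates since new_x2 grows toward y1+y2-x1)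
def soccerLoopA (x1 : Int) (y1 : Int) (y2 : Int) (new_x2 : Int) : Int :=
  if x1 + new_x2 < y1 + y2 then soccerLoopA x1 y1 y2 (new_x2 + 1) else new_x2
termination_by (y1 + y2 - (x1 + new_x2)).toNat
decreasing_by omega

def soccer_sucks (x1 : Int) (y1 : Int) (x2 : Int) (y2 : Int) (home : Int) : Int :=
  let new_x2 := soccerLoopA x1 y1 y2 x2
  if home == 2 then
    if y1 <= y2 then new_x2 + 1 else new_x2
  else new_x2 + 1

-- ===== PORT B =====
def soccer_sucks_alt (x1 : Int) (y1 : Int) (x2 : Int) (y2 : Int) (home : Int) : Int :=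
  let tied := max x2 (y1 + y2 - x1)
  if home == 2 && y1 > y2 then tied else tied + 1

-- ===== PRECONDITION & SPEC =====
def Spec_soccer_sucks (x1 : Int) (y1 : Int) (x2 : Int) (y2 : Int) (home : Int) (out : Int) : Prop := out = soccer_sucks_alt x1 y1 x2 y2 home
instance (x1 : Int) (y1 : Int) (x2 : Int) (y2 : Int) (home : Int) (out : Int) : Decidable (Spec_soccer_sucks x1 y1 x2 y2 home out) := by unfold Spec_soccer_sucks; infer_instance

-- ===== CLAIM (what is proved, stated in full; the proofs are below) =====
def Claim_equal_soccer_sucks : Prop := ∀ (x1 : Int) (y1 : Int) (x2 : Int) (y2 : Int) (home : Int), Dom_soccer_sucks x1 y1 x2 y2 home → Spec_soccer_sucks x1 y1 x2 y2 home (soccer_sucks x1 y1 x2 y2 home)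

-- ===== LEMMAS AND PROOFS =====

-- ===== VERDICT (by name: the statement is the Claim_ definition above) =====
theorem soccerLoopA_eq (x1 y1 y2 nx2 : Int) : soccerLoopA x1 y1 y2 nx2 = max nx2 (y1 + y2 - x1) := by
  fun_induction soccerLoopA with
  | case1 nx2 h ih => rw [ih]; omega
  | case2 nx2 h => omega

theorem soccer_sucks_spec : Claim_equal_soccer_sucks := by
  intro x1 y1 x2 y2 home _
  unfold Spec_soccer_sucks soccer_sucks soccer_sucks_alt
  rw [soccerLoopA_eq]
  simp only [beq_iff_eq, Bool.and_eq_true, decide_eq_true_eq]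
  split_ifs <;> simp_all <;> omega
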